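-- pv_equiv track=rewrite | github.com/RbCaVi/PotatoBot | discordpotato.py | process
-- ===== SOURCE A (Python) =====
-- def process(message):
--     replacements={
--         "o":['0'],
--         "a":['4','@'],
--         "":['\n',' '],
--     }
--     processed_message=message
--     repl={}
--     for r in replacements:
--         ps=replacements[r]
--         for p in ps:
--             repl[p]=r
--     for p in repl:
--         r=repl[p]
--         processed_message=processed_message.replace(p,r)
--     return processed_message
-- ===== SOURCE B (Python) =====
-- def process(message):
--     table = {'0': 'o', '4': 'a', '@': 'a', '\n': '', ' ': ''}
--     return ''.join(table.get(c, c) for c in message)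
-- ===== Notes on version B (the rewrite author's own statement) =====
-- stated objective: idiomatic
-- what changed: replaces five sequential full-string str.replace passes (after building the inverse dict in a nested loop) with a single character-level pass joining each character's replacement from one lookup table
import Mathlib
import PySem

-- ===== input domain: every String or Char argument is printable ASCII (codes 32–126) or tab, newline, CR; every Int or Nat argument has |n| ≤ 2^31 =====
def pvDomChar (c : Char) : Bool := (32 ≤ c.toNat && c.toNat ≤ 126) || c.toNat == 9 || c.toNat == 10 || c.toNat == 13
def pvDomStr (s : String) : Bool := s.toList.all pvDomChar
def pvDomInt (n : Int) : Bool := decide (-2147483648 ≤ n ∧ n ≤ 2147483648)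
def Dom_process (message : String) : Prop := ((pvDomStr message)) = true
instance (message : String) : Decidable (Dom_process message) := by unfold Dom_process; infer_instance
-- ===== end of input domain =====

-- B replaces A's five sequential full-string .replace passes (over a dict built by a nested loop)
-- with one character-level pass through a single lookup table; same return value, idiomatic form.


-- ===== PORT A =====
def process (message : String) : String :=
  let replacements : PySem.Dict String (List String) :=
    PySem.Dict.ofList [("o", ["0"]), ("a", ["4", "@"]), ("", ["\n", " "])]
  let repl : PySem.Dict String String :=
    replacements.items.foldl
      (fun d rps => rps.2.foldl (fun d p => d.insert p rps.1) d)
      (PySem.Dict.ofList [])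
  repl.items.foldl (fun pm pr => PySem.Str.replace pm pr.1 pr.2) message

-- ===== PORT B =====
-- table.get(c, c): the dict-literal lookup is ported as the equivalent first-match chain of tests
def process_alt (message : String) : String :=
  String.ofList (message.toList.flatMap (fun c =>
    if c = '0' then ['o']
    else if c = '4' then ['a']
    else if c = '@' then ['a']
    else if c = '\n' then []
    else if c = ' ' then []
    else [c]))

-- ===== PRECONDITION & SPEC =====
def Spec_process (message : String) (out : String) : Prop := out = process_alt message
instance (message : String) (out : String) : Decidable (Spec_process message out) := by unfold Spec_process; infer_instance

-- ===== CLAIM (what is proved, stated in full; the proofs are below) =====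
def Claim_equal_process : Prop := ∀ (message : String), Dom_process message → Spec_process message (process message)

-- ===== LEMMAS AND PROOFS =====

-- a single-character replace is a character-wise flatMap
theorem go_single (p : Char) (new : List Char) :
    ∀ (l acc : List Char) (fuel : Nat), l.length ≤ fuel →
      PySem.Chars.replace.go [p] new fuel l acc =
        acc.reverse ++ l.flatMap (fun c => if c = p then new else [c]) := by
  intro l
  induction l with
  | nil =>
      intro acc fuel _
      cases fuel <;> simp [PySem.Chars.replace.go]
  | cons c t ih =>
      intro acc fuel hle
      cases fuel with
      | zero => simp at hle
      | succ fuel =>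
        simp only [PySem.Chars.replace.go]
        by_cases h : c = p
        · subst h
          have hpre : List.isPrefixOf [c] (c :: t) = true := by
            simp [List.isPrefixOf]
          rw [hpre]
          simp only [if_true, List.length_cons, List.length_nil, List.drop_succ_cons,
            List.drop_zero]
          rw [ih (new.reverse ++ acc) fuel (by simpa using Nat.le_of_succ_le_succ hle)]
          simp
        · have hpre : List.isPrefixOf [p] (c :: t) = false := by
            simp [List.isPrefixOf]
            exact fun hh => (h hh.symm).elim
          rw [hpre]
          simp only [Bool.false_eq_true, if_false]
          rw [ih (c :: acc) fuel (by simpa using Nat.le_of_succ_le_succ hle)]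
          simp [h]

theorem replace_single (p : Char) (new s : List Char) :
    PySem.Chars.replace s [p] new = s.flatMap (fun c => if c = p then new else [c]) := by
  simp only [PySem.Chars.replace, List.isEmpty_cons, Bool.false_eq_true, if_false]
  simpa using go_single p new s [] s.length le_rfl

-- ===== VERDICT (by name: the statement is the Claim_ definition above) =====
theorem process_spec : Claim_equal_process := by
  intro message _
  unfold Spec_process
  have hA : process message =
      PySem.Str.replace (PySem.Str.replace (PySem.Str.replace (PySem.Str.replace
        (PySem.Str.replace message "0" "o") "4" "a") "@" "a") "\n" "") " " "" := rfl
  apply String.toList_injective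
  rw [hA]
  simp only [PySem.Str.toList_replace, process_alt]
  have h0 : "0".toList = ['0'] := rfl
  have h4 : "4".toList = ['4'] := rfl
  have hat : "@".toList = ['@'] := rfl
  have hn : "\n".toList = ['\n'] := rfl
  have hsp : " ".toList = [' '] := rfl
  have ho : "o".toList = ['o'] := rfl
  have ha : "a".toList = ['a'] := rfl
  have he : "".toList = ([] : List Char) := rfl
  have hmk : ∀ l : List Char, (String.ofList l).toList = l := fun l => String.toList_ofList
  rw [h0, h4, hat, hn, hsp, ho, ha, he, hmk]
  rw [replace_single '0' ['o'], replace_single '4' ['a'], replace_single '@' ['a'],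
      replace_single '\n' [], replace_single ' ' []]
  simp only [List.flatMap_assoc]
  apply List.flatMap_congr  -- pointwise equality of the composed substitution table
  intro c _
  by_cases h0 : c = '0' <;> by_cases h4 : c = '4' <;> by_cases ha : c = '@' <;>
    by_cases hn : c = '\n' <;> by_cases hs : c = ' ' <;> simp_all
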